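-- pv_equiv track=rewrite | github.com/RomainGrx/LINMA1691-Homeworks | Devoir 1/prog.py | are_iso
-- ===== SOURCE A (Python) =====
-- import itertools
--
-- def check_mapping(A, B, h):
--     """
--     Input :
--         - A, B two adjacency matrices (arrays of arrays) with same dimensions
--         - h an array describing an isomorphism mapping node i from A to node h[i] from B
--     Return True if h(A) = B, False otherwise
--     """
--     n = len(A)
--     matrix = [x[:] for x in A]
--
--     for i in range(n):
--         for j in range(n):
--             val = B[h[i]][h[j]]
--             if (A[i][j] != val):
--                 return False
--             matrix[i][j] = val
--
--     return True
--
-- def are_iso(A,B):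
--     """
--     Input :
--         - A, B two adjacency matrices (arrays of arrays) with same dimensions
--
--     Return (Ans, h) with :
--         - Ans = True if A and B are isomorphs, False otherwise
--         - h an array describing an isomorphim such that h(A) = B
--     """
--     n = len(A)
--     arange = range(n)
--     h_possibilities = list(itertools.permutations(arange))
--
--     for h in h_possibilities:
--         if check_mapping(A, B, list(h)):
--             return True,list(h)
--
--     return False, []
-- ===== SOURCE B (Python) =====
-- def are_iso(A, B):
--     n = len(A)
--
--     def consistent(h):
--         # h[:k] was already checked; verify the new row/column pairs for k = len(h)-1
--         k = len(h) - 1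
--         for i in range(k + 1):
--             if A[i][k] != B[h[i]][h[k]] or A[k][i] != B[h[k]][h[i]]:
--                 return False
--         return True
--
--     def search(h, free):
--         if not free:
--             return h
--         for idx, v in enumerate(free):
--             h.append(v)
--             if consistent(h):
--                 r = search(h, free[:idx] + free[idx + 1:])
--                 if r is not None:
--                     return r
--             h.pop()
--         return None
--
--     r = search([], list(range(n)))
--     if r is None:
--         return False, []
--     return True, r
-- ===== Notes on version B (the rewrite author's own statement) =====
-- stated objective: faster
-- what changed: Replaced the generate-all-n!-permutations-then-test scan with an incremental backtracking search that extends a partial mapping one vertex at a time in lexicographic order and prunes a branch as soon as a new row/column pair mismatches, so failing prefixes cut off (n-k)! completions at once.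
-- outside the precondition, e.g. on are_iso([[1], [1, 1]], [[0, 0], [0, 0]]): A returns (False, []), B returns (False, [])
import Mathlib
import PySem

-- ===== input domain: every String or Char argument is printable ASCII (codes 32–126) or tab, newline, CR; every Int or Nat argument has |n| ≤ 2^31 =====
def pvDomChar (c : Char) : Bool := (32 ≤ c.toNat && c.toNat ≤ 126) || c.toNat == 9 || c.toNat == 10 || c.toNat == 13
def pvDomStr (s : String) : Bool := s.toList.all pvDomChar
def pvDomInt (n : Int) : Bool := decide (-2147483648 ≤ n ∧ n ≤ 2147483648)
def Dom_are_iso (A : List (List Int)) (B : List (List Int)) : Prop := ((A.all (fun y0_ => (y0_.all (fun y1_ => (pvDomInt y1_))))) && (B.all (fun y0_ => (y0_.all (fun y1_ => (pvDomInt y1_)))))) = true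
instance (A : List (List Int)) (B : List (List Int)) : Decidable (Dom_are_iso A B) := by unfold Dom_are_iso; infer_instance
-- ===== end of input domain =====

-- B replaces A's scan of all n! permutations by lexicographic backtracking that prunes a
-- partial mapping as soon as a new row/column pair mismatches (same first-found mapping);
-- return value only (A also builds a local copy `matrix` it never reads, and mutates nothing).


-- ===== PORT A =====
-- M[i][j] (in range under Pre_; 0 / [] defaults are never reached there)
def pvCell (M : List (List Int)) (i j : Int) : Int :=
  (PySem.List.pyGet? ((PySem.List.pyGet? M i).getD []) j).getD 0

-- h[i] (in range under Pre_)
def pvAt (h : List Int) (i : Int) : Int := (PySem.List.pyGet? h i).getD 0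

-- the double loop with early `return False`; the local copy `matrix` is written but never
-- read, so it does not affect the return value and is omitted
def check_mapping (A : List (List Int)) (B : List (List Int)) (h : List Int) : Bool :=
  let n : Int := A.length
  (PySem.List.pyRange 0 n 1).all (fun i =>
    (PySem.List.pyRange 0 n 1).all (fun j =>
      pvCell A i j == pvCell B (pvAt h i) (pvAt h j)))

def are_iso (A : List (List Int)) (B : List (List Int)) : Bool × List Int :=
  let n := A.length
  let h_possibilities := PySem.List.permutations (PySem.List.pyRange 0 (n : Int) 1) n
  match h_possibilities.find? (fun h => check_mapping A B h) with
  | some h => (true, h)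
  | none => (false, [])

-- ===== PORT B =====
-- B's `consistent(h)`: check the new pairs (i,k),(k,i) for k = len(h)-1
def pvConsistent (A : List (List Int)) (B : List (List Int)) (h : List Int) : Bool :=
  let k : Int := (h.length : Int) - 1
  (PySem.List.pyRange 0 (k + 1) 1).all (fun i =>
    (pvCell A i k == pvCell B (pvAt h i) (pvAt h k)) &&
    (pvCell A k i == pvCell B (pvAt h k) (pvAt h i)))

-- B's `search(h, free)`; fuel = |free| at every call from the entry; the loop
-- `for idx, v in enumerate(free)` with rest free[:idx]+free[idx+1:] = free.eraseIdx idx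
def pvSearch (A : List (List Int)) (B : List (List Int)) :
    Nat → List Int → List Int → Option (List Int)
  | 0, h, _ => some h
  | f + 1, h, free =>
      (List.range free.length).findSome? (fun i =>
        match free[i]? with
        | none => none
        | some v =>
            let h' := h ++ [v]
            if pvConsistent A B h' then pvSearch A B f h' (free.eraseIdx i) else none)

def are_iso_alt (A : List (List Int)) (B : List (List Int)) : Bool × List Int :=
  let n := A.length
  match pvSearch A B n [] (PySem.List.pyRange 0 (n : Int) 1) with
  | some h => (true, h)
  | none => (false, [])

-- ===== PRECONDITION & SPEC =====
-- Every index access A can perform is in range (n = len(A) rows of length ≥ n on both sides).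
-- Outside it A raises IndexError, except when a value mismatch is hit first for every
-- permutation, in which case A and B both return (False, []) before any bad access.
def Pre_are_iso (A : List (List Int)) (B : List (List Int)) : Prop :=
  A.length ≤ B.length ∧ (∀ r ∈ A, A.length ≤ r.length) ∧
    (∀ r ∈ B.take A.length, A.length ≤ r.length)
instance (A : List (List Int)) (B : List (List Int)) : Decidable (Pre_are_iso A B) := by
  unfold Pre_are_iso; infer_instance

def pvWitness_are_iso : List (List Int) × List (List Int) := ([[0, 1], [1, 0]], [[0, 1], [1, 0]])

def Spec_are_iso (A : List (List Int)) (B : List (List Int)) (out : Bool × List Int) : Prop := out = are_iso_alt A B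
instance (A : List (List Int)) (B : List (List Int)) (out : Bool × List Int) : Decidable (Spec_are_iso A B out) := by unfold Spec_are_iso; infer_instance

-- ===== CLAIM (what is proved, stated in full; the proofs are below) =====
def Claim_equal_are_iso : Prop := ∀ (A : List (List Int)) (B : List (List Int)), Dom_are_iso A B → Pre_are_iso A B → Spec_are_iso A B (are_iso A B)

-- ===== LEMMAS AND PROOFS =====

-- permutations xs (r+1): choose position i, prepend xs[i], recurse on the rest
theorem pvPerms_succ (xs : List Int) (r : Nat) : PySem.List.permutations xs (r+1) =
    (List.range xs.length).flatMap (fun i =>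
      match xs[i]? with
      | none => []
      | some v => (PySem.List.permutations (xs.eraseIdx i) r).map (fun p => v :: p)) := by
  simp only [PySem.List.permutations]
  rw [List.flatMap_def, List.flatMap_def]
  exact congrArg List.flatten
    (List.map_congr_left (fun i _ => by cases xs[i]? <;> simp))

theorem pvPerms_zero (xs : List Int) : PySem.List.permutations xs 0 = [[]] := by
  simp [PySem.List.permutations]

theorem pvFindSome?_flatMap {a b c : Type} (l : List a) (g : a → List b) (F : b → Option c) :
    (l.flatMap g).findSome? F = l.findSome? (fun x => (g x).findSome? F) := by
  induction l with
  | nil => rfl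
  | cons x t ih =>
    rw [List.flatMap_cons, List.findSome?_append, ih]
    cases hgx : (g x).findSome? F <;> simp [hgx]

theorem pvFind?_eq_findSome? {a : Type} (l : List a) (p : a → Bool) :
    l.find? p = l.findSome? (fun x => if p x = true then some x else none) := by
  induction l with
  | nil => rfl
  | cons x t ih => by_cases h : p x = true <;> simp [h, ih]

-- one mismatch test of the double loops, as a named boolean (proof-side only)
def pvPair (A : List (List Int)) (B : List (List Int)) (h : List Int) (i j : Int) : Bool :=
  pvCell A i j == pvCell B (pvAt h i) (pvAt h j)

theorem pvCheck_iff (A B : List (List Int)) (h : List Int) :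
    check_mapping A B h = true ↔
      ∀ i j : Int, 0 ≤ i → i < A.length → 0 ≤ j → j < A.length → pvPair A B h i j = true := by
  unfold check_mapping pvPair
  simp only [List.all_eq_true, PySem.List.mem_pyRange_one]
  constructor
  · intro H i j h0i hia h0j hja; exact H i ⟨h0i, hia⟩ j ⟨h0j, hja⟩
  · intro H i hi j hj; exact H i j hi.1 hi.2 hj.1 hj.2

theorem pvConsistent_iff (A B : List (List Int)) (h : List Int) :
    pvConsistent A B h = true ↔
      ∀ i : Int, 0 ≤ i → i < h.length →
        pvPair A B h i ((h.length : Int) - 1) = true ∧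
        pvPair A B h ((h.length : Int) - 1) i = true := by
  unfold pvConsistent pvPair
  simp only [List.all_eq_true, PySem.List.mem_pyRange_one, Bool.and_eq_true]
  constructor
  · intro H i h0 hi; exact H i ⟨h0, by omega⟩
  · intro H i hi; exact H i hi.1 (by omega)

theorem pvAt_agree (h t : List Int) (i : Int) (h0 : 0 ≤ i) (hl : i < h.length) :
    pvAt (h ++ t) i = pvAt h i := by
  unfold pvAt
  rw [PySem.List.pyGet?_of_nonneg (h ++ t) h0, PySem.List.pyGet?_of_nonneg h h0,
    List.getElem?_append_left (by omega)]

theorem pvAt_take (h : List Int) (m : Nat) (i : Int) (h0 : 0 ≤ i) (hi : i < m)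
    (_hm : m ≤ h.length) : pvAt (h.take m) i = pvAt h i := by
  unfold pvAt
  rw [PySem.List.pyGet?_of_nonneg (h.take m) h0, PySem.List.pyGet?_of_nonneg h h0,
    List.getElem?_take_of_lt (by omega)]

theorem pvPair_agree (A B : List (List Int)) (h t : List Int) (i j : Int)
    (h0i : 0 ≤ i) (hi : i < h.length) (h0j : 0 ≤ j) (hj : j < h.length) :
    pvPair A B (h ++ t) i j = pvPair A B h i j := by
  unfold pvPair; rw [pvAt_agree h t i h0i hi, pvAt_agree h t j h0j hj]

theorem pvPair_take (A B : List (List Int)) (h : List Int) (m : Nat) (i j : Int)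
    (h0i : 0 ≤ i) (hi : i < m) (h0j : 0 ≤ j) (hj : j < m) (hm : m ≤ h.length) :
    pvPair A B (h.take m) i j = pvPair A B h i j := by
  unfold pvPair; rw [pvAt_take h m i h0i hi hm, pvAt_take h m j h0j hj hm]

-- if every incremental check along h passed, the full double-loop check passes
theorem pvFull_of_steps (A B : List (List Int)) (h : List Int) (hn : h.length = A.length)
    (hs : ∀ m : Nat, 1 ≤ m → m ≤ h.length → pvConsistent A B (h.take m) = true) :
    check_mapping A B h = true := by
  rw [pvCheck_iff]
  intro i j h0i hia h0j hja
  rcases (by omega : i ≤ j ∨ j < i) with hij | hij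
  · have hm : j.toNat + 1 ≤ h.length := by omega
    have hc := (pvConsistent_iff A B (h.take (j.toNat + 1))).mp
      (hs (j.toNat + 1) (by omega) hm)
    have hlen : (h.take (j.toNat + 1)).length = j.toNat + 1 := by
      rw [List.length_take]; omega
    have := (hc i (by omega) (by omega)).1
    rw [hlen] at this
    have hj' : ((j.toNat + 1 : Nat) : Int) - 1 = j := by omega
    rw [hj'] at this
    rwa [pvPair_take A B h (j.toNat + 1) i j h0i (by omega) h0j (by omega) hm] at this
  · have hm : i.toNat + 1 ≤ h.length := by omega
    have hc := (pvConsistent_iff A B (h.take (i.toNat + 1))).mp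
      (hs (i.toNat + 1) (by omega) hm)
    have hlen : (h.take (i.toNat + 1)).length = i.toNat + 1 := by
      rw [List.length_take]; omega
    have := (hc j (by omega) (by omega)).2
    rw [hlen] at this
    have hi' : ((i.toNat + 1 : Nat) : Int) - 1 = i := by omega
    rw [hi'] at this
    rwa [pvPair_take A B h (i.toNat + 1) i j h0i (by omega) h0j (by omega) hm] at this

-- a failed incremental check kills every completion of the prefix
theorem pvPrune (A B : List (List Int)) (h t : List Int) (hne : h ≠ [])
    (hlen : h.length ≤ A.length) (hc : pvConsistent A B h = false) :
    check_mapping A B (h ++ t) = false := by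
  by_contra hfull
  rw [Bool.not_eq_false] at hfull
  have full := (pvCheck_iff A B (h ++ t)).mp hfull
  have hpos : 0 < h.length := List.length_pos_of_ne_nil hne
  have : pvConsistent A B h = true := by
    rw [pvConsistent_iff]
    intro i h0 hi
    have hk0 : (0:Int) ≤ (h.length : Int) - 1 := by omega
    have hk : (h.length : Int) - 1 < (A.length : Int) := by omega
    have p1 := full i ((h.length : Int) - 1) h0 (by omega) hk0 hk
    have p2 := full ((h.length : Int) - 1) i hk0 hk h0 (by omega)
    rw [pvPair_agree A B h t i _ h0 hi hk0 (by omega)] at p1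
    rw [pvPair_agree A B h t _ i hk0 (by omega) h0 hi] at p2
    exact ⟨p1, p2⟩
  simp [this] at hc

-- MAIN: lexicographic scan of all completions of a consistent prefix = pruned backtracking
theorem pvMain (A B : List (List Int)) : ∀ (f : Nat) (pool h : List Int),
    pool.length = f → h.length + f = A.length →
    (∀ m : Nat, 1 ≤ m → m ≤ h.length → pvConsistent A B (h.take m) = true) →
    (PySem.List.permutations pool f).findSome?
        (fun t => if check_mapping A B (h ++ t) = true then some (h ++ t) else none)
      = pvSearch A B f h pool := by
  intro f
  induction f with
  | zero =>
    intro pool h hpool hlen hsteps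
    rw [pvPerms_zero]
    simp only [List.findSome?_cons, List.findSome?_nil, List.append_nil]
    rw [pvFull_of_steps A B h (by omega) hsteps]
    rfl
  | succ f ih =>
    intro pool h hpool hlen hsteps
    rw [pvPerms_succ, pvFindSome?_flatMap]
    show _ = pvSearch A B (f+1) h pool
    rw [pvSearch]
    congr 1
    funext i
    cases hv : pool[i]? with
    | none => simp
    | some v =>
      simp only
      have hi : i < pool.length := (List.getElem?_eq_some_iff.mp hv).1
      rw [List.findSome?_map]
      have hrw : ((fun t => if check_mapping A B (h ++ t) = true then some (h ++ t) else none)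
            ∘ (fun p => v :: p))
          = fun t => if check_mapping A B ((h ++ [v]) ++ t) = true
              then some ((h ++ [v]) ++ t) else none := by
        funext t; simp
      rw [hrw]
      by_cases hcons : pvConsistent A B (h ++ [v]) = true
      · rw [if_pos hcons]
        apply ih
        · rw [List.length_eraseIdx_of_lt hi]; omega
        · simp; omega
        · intro m h1 hm
          simp only [List.length_append, List.length_cons, List.length_nil] at hm
          rcases Nat.lt_or_ge m (h.length + 1) with hlt | hge
          · rw [List.take_append_of_le_length (by omega)]
            exact hsteps m h1 (by omega)
          · have hmeq : m = h.length + 1 := by omega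
            rw [hmeq, List.take_of_length_le (by simp)]
            exact hcons
      · rw [if_neg hcons]
        apply List.findSome?_eq_none_iff.mpr
        intro t ht
        rw [pvPrune A B (h ++ [v]) t (by simp) (by simp; omega)
          (Bool.not_eq_true _ ▸ hcons)]
        simp

theorem pvTop (A B : List (List Int)) : are_iso A B = are_iso_alt A B := by
  have hlen : (PySem.List.pyRange 0 (A.length : Int) 1).length = A.length := by
    rw [PySem.List.length_pyRange_one]; simp
  have hmain := pvMain A B A.length (PySem.List.pyRange 0 (A.length : Int) 1) []
    hlen (by simp) (by intro m h1 h2; simp at h2; omega)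
  simp only [List.nil_append] at hmain
  show (match (PySem.List.permutations (PySem.List.pyRange 0 (A.length : Int) 1)
          A.length).find? (fun h => check_mapping A B h) with
        | some h => (true, h) | none => (false, [])) =
      (match pvSearch A B A.length [] (PySem.List.pyRange 0 (A.length : Int) 1) with
        | some h => (true, h) | none => (false, []))
  rw [pvFind?_eq_findSome?]
  simp only [hmain]

-- ===== VERDICT (by name: the statement is the Claim_ definition above) =====
theorem are_iso_spec : Claim_equal_are_iso := by
  intro A B _ _
  unfold Spec_are_iso
  exact pvTop A B
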